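-- pv_equiv track=rewrite | github.com/npversteegh/ht-fetch-ids | ht_fetch_ids.py | translate_to_english
-- ===== SOURCE A (Python) =====
-- def translate_to_english(enumcron: str) -> str:
--     translations = {
--         "jahrg": "v",
--         "Jahrg": "v",
--         "bd": "pt",
--     }
--     translated = enumcron
--     for foreign, english in translations.items():
--         translated = translated.replace(foreign, english)
--     return translated
-- ===== SOURCE B (Python) =====
-- def translate_to_english(enumcron: str) -> str:
--     out = []
--     i = 0
--     n = len(enumcron)
--     while i < n:
--         if enumcron.startswith("jahrg", i) or enumcron.startswith("Jahrg", i):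
--             out.append("v")
--             i += 5
--         elif enumcron.startswith("bd", i):
--             out.append("pt")
--             i += 2
--         else:
--             out.append(enumcron[i])
--             i += 1
--     return "".join(out)
-- ===== Notes on version B (the rewrite author's own statement) =====
-- stated objective: alternative
-- what changed: Replaces the three sequential full-string .replace passes by a single left-to-right scan that matches whichever abbreviation starts at the current position and appends its translation; correct because the keys cannot overlap and the replacement texts never create or destroy a match.
import Mathlib
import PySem

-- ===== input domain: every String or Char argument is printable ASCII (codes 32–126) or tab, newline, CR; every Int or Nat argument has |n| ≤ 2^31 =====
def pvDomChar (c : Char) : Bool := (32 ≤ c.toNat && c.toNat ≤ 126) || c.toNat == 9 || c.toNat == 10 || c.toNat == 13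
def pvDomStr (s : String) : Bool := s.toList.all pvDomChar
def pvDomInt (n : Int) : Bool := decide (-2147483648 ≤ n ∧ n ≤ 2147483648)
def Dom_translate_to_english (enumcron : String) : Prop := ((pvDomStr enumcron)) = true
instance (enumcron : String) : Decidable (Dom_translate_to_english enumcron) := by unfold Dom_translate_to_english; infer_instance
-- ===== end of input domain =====

-- B replaces A's three sequential full-string .replace passes by one left-to-right scan
-- substituting whichever abbreviation starts at the current position (objective: alternative).

-- ===== PORT A =====
-- literal port: a dict of translations, then a loop doing translated = translated.replace(foreign, english)
def translate_to_english (enumcron : String) : String :=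
  let translations : PySem.Dict String String :=
    PySem.Dict.ofList [("jahrg", "v"), ("Jahrg", "v"), ("bd", "pt")]
  translations.items.foldl
    (fun translated fe => PySem.Str.replace translated fe.1 fe.2) enumcron

-- ===== PORT B =====
-- port of Source B's single scan: at each position try "jahrg"/"Jahrg", then "bd", else copy one char
def pvScan : List Char → List Char
  | 'j'::'a'::'h'::'r'::'g'::rest => 'v' :: pvScan rest
  | 'J'::'a'::'h'::'r'::'g'::rest => 'v' :: pvScan rest
  | 'b'::'d'::rest => 'p' :: 't' :: pvScan rest
  | c :: rest => c :: pvScan rest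
  | [] => []

def translate_to_english_alt (enumcron : String) : String :=
  String.ofList (pvScan enumcron.toList)

-- ===== PRECONDITION & SPEC =====
def Spec_translate_to_english (enumcron : String) (out : String) : Prop := out = translate_to_english_alt enumcron
instance (enumcron : String) (out : String) : Decidable (Spec_translate_to_english enumcron out) := by unfold Spec_translate_to_english; infer_instance

-- ===== CLAIM (what is proved, stated in full; the proofs are below) =====
def Claim_equal_translate_to_english : Prop := ∀ (enumcron : String), Dom_translate_to_english enumcron → Spec_translate_to_english enumcron (translate_to_english enumcron)

-- ===== LEMMAS AND PROOFS =====

-- structural characterisation of one Python str.replace pass (nonempty pattern)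
def pvRepl (old new : List Char) : List Char → List Char
  | [] => []
  | c :: t =>
      if old.isPrefixOf (c :: t) then new ++ pvRepl old new (t.drop (old.length - 1))
      else c :: pvRepl old new t
termination_by l => l.length
decreasing_by
  · simp only [List.length_drop, List.length_cons]; omega
  · simp

lemma go_eq (old new : List Char) (hold : old ≠ []) :
    ∀ (fuel : Nat) (l acc : List Char), l.length ≤ fuel →
      PySem.Chars.replace.go old new fuel l acc = acc.reverse ++ pvRepl old new l := by
  intro fuel
  induction fuel with
  | zero =>
      intro l acc hl
      have : l = [] := by
        cases l with
        | nil => rfl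
        | cons c t => simp at hl
      subst this
      simp [PySem.Chars.replace.go, pvRepl]
  | succ n ih =>
      intro l acc hl
      cases l with
      | nil => simp [PySem.Chars.replace.go, pvRepl]
      | cons c t =>
          rw [PySem.Chars.replace.go]
          rw [pvRepl]
          by_cases hp : old.isPrefixOf (c :: t) = true
          · simp only [hp, if_true]
            have hlen : (List.drop old.length (c :: t)).length ≤ n := by
              simp only [List.length_drop, List.length_cons]
              have : 1 ≤ old.length := by
                cases old with
                | nil => exact absurd rfl hold
                | cons _ _ => simp
              simp only [List.length_cons] at hl
              omega
            rw [ih _ _ hlen]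
            have hdrop : List.drop old.length (c :: t) = t.drop (old.length - 1) := by
              cases old with
              | nil => exact absurd rfl hold
              | cons o os => simp
            rw [hdrop]
            simp
          · simp only [hp]
            simp only [Bool.false_eq_true, if_false]
            have hlen : t.length ≤ n := by
              simp only [List.length_cons] at hl; omega
            rw [ih _ _ hlen]
            simp

lemma replace_eq (old new l : List Char) (hold : old ≠ []) :
    PySem.Chars.replace l old new = pvRepl old new l := by
  rw [PySem.Chars.replace]
  have : old.isEmpty = false := by cases old with
    | nil => exact absurd rfl hold
    | cons _ _ => rfl
  rw [this]
  simpa using go_eq old new hold l.length l [] (le_refl _)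

-- a single-char pattern [d], d ≠ 'v', cannot appear at the head after a pvRepl _ ['v'] pass
lemma head_false (old : List Char) (d : Char) (hd : d ≠ 'v') :
    ∀ l : List Char, [d].isPrefixOf l = false → [d].isPrefixOf (pvRepl old ['v'] l) = false := by
  intro l h
  cases l with
  | nil => simp [pvRepl]
  | cons c t =>
      rw [pvRepl]
      by_cases hp : old.isPrefixOf (c :: t) = true
      · simp [hp, List.isPrefixOf, hd]
      · simp only [hp, Bool.false_eq_true, if_false]
        simp only [List.isPrefixOf, Bool.and_eq_false_iff] at h ⊢
        rcases h with h | h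
        · exact Or.inl h
        · simp at h
  
-- extending a pattern by one char on the left, for pvRepl _ ['v'] passes
lemma pre_false_step (old : List Char) (x : Char) (pat : List Char) (hx : x ≠ 'v')
    (ihpat : ∀ t : List Char, pat.isPrefixOf t = false → pat.isPrefixOf (pvRepl old ['v'] t) = false) :
    ∀ l : List Char, (x :: pat).isPrefixOf l = false →
      (x :: pat).isPrefixOf (pvRepl old ['v'] l) = false := by
  intro l h
  cases l with
  | nil => simp [pvRepl]
  | cons c t =>
      rw [pvRepl]
      by_cases hp : old.isPrefixOf (c :: t) = true
      · simp [hp, List.isPrefixOf, hx]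
      · simp only [hp, Bool.false_eq_true, if_false]
        simp only [List.isPrefixOf, Bool.and_eq_false_iff] at h ⊢
        rcases h with h | h
        · exact Or.inl h
        · exact Or.inr (ihpat t h)

-- the chain "ahrg" cannot appear as a prefix after a jahrg/Jahrg replacement pass unless it was one before
lemma ahrg_false (old : List Char) :
    ∀ l : List Char, (['a','h','r','g']).isPrefixOf l = false →
      (['a','h','r','g']).isPrefixOf (pvRepl old ['v'] l) = false := by
  have hg : ∀ t : List Char, (['g'] : List Char).isPrefixOf t = false →
      (['g'] : List Char).isPrefixOf (pvRepl old ['v'] t) = false :=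
    head_false old 'g' (by decide)
  have hrg := pre_false_step old 'r' ['g'] (by decide) hg
  have hhrg := pre_false_step old 'h' ['r','g'] (by decide) hrg
  exact pre_false_step old 'a' ['h','r','g'] (by decide) hhrg

lemma composite : ∀ l : List Char,
    pvRepl ['b','d'] ['p','t'] (pvRepl ['J','a','h','r','g'] ['v'] (pvRepl ['j','a','h','r','g'] ['v'] l))
      = pvScan l := by
  intro l
  induction l using pvScan.induct with
  | case1 rest ih => simp [pvScan, pvRepl, ih]
  | case2 rest ih => simp [pvScan, pvRepl, ih]
  | case3 rest ih => simp [pvScan, pvRepl, ih]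
  | case4 c rest h1 h2 h3 ih =>
      rw [pvScan.eq_4 c rest h1 h2 h3]
      by_cases hcj : c = 'j'
      · subst hcj
        have hrest : (['a','h','r','g'] : List Char).isPrefixOf rest = false := by
          cases hpr : (['a','h','r','g'] : List Char).isPrefixOf rest with
          | false => rfl
          | true =>
              obtain ⟨s, hs⟩ := List.isPrefixOf_iff_prefix.mp hpr
              exact (h1 s rfl hs.symm).elim
        simp [pvRepl, List.isPrefixOf, hrest, ih]
      by_cases hcJ : c = 'J'
      · subst hcJ
        have hrest : (['a','h','r','g'] : List Char).isPrefixOf rest = false := by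
          cases hpr : (['a','h','r','g'] : List Char).isPrefixOf rest with
          | false => rfl
          | true =>
              obtain ⟨s, hs⟩ := List.isPrefixOf_iff_prefix.mp hpr
              exact (h2 s rfl hs.symm).elim
        have hJ := ahrg_false ['j','a','h','r','g'] rest hrest
        simp [pvRepl, List.isPrefixOf, hJ, ih]
      by_cases hcb : c = 'b'
      · subst hcb
        have hrest : (['d'] : List Char).isPrefixOf rest = false := by
          cases hpr : (['d'] : List Char).isPrefixOf rest with
          | false => rfl
          | true =>
              obtain ⟨s, hs⟩ := List.isPrefixOf_iff_prefix.mp hpr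
              exact (h3 s rfl hs.symm).elim
        have hd1 := head_false ['j','a','h','r','g'] 'd' (by decide) rest hrest
        have hd2 := head_false ['J','a','h','r','g'] 'd' (by decide)
          (pvRepl ['j','a','h','r','g'] ['v'] rest) hd1
        simp [pvRepl, List.isPrefixOf, hd2, ih]
      · have e1 : ('j' == c) = false := beq_eq_false_iff_ne.mpr (fun h => hcj h.symm)
        have e2 : ('J' == c) = false := beq_eq_false_iff_ne.mpr (fun h => hcJ h.symm)
        have e3 : ('b' == c) = false := beq_eq_false_iff_ne.mpr (fun h => hcb h.symm)
        simp [pvRepl, List.isPrefixOf, e1, e2, e3, ih]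
  | case5 => simp [pvRepl, pvScan]

-- unfolding A's foldl over the three dict items
lemma A_unfold (s : String) :
    translate_to_english s =
      PySem.Str.replace (PySem.Str.replace (PySem.Str.replace s "jahrg" "v") "Jahrg" "v") "bd" "pt" := rfl

-- ===== VERDICT (by name: the statement is the Claim_ definition above) =====
theorem translate_to_english_spec : Claim_equal_translate_to_english := by
  intro s _
  unfold Spec_translate_to_english
  rw [A_unfold, translate_to_english_alt]
  rw [PySem.Str.replace, PySem.Str.replace, PySem.Str.replace]
  simp only [String.toList_ofList]
  have hj : ("jahrg" : String).toList = ['j','a','h','r','g'] := rfl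
  have hJ : ("Jahrg" : String).toList = ['J','a','h','r','g'] := rfl
  have hb : ("bd" : String).toList = ['b','d'] := rfl
  have hv : ("v" : String).toList = ['v'] := rfl
  have hp : ("pt" : String).toList = ['p','t'] := rfl
  rw [hj, hJ, hb, hv, hp]
  rw [replace_eq _ _ _ (by decide), replace_eq _ _ _ (by decide), replace_eq _ _ _ (by decide)]
  rw [composite]
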